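-- pv_equiv track=rewrite | github.com/jianershi/algorithm | 1824.py | getMaxOccurrences
-- ===== SOURCE A (Python) =====
-- def getMaxOccurrences(s, minLength, maxLength, maxUnique):
--     # write your code here
--     if not s or maxLength < 0 or maxUnique < 0 or len(s) < minLength:
--         return 0
--
--     minLength = max(1, minLength)
--
--     max_occurance = {}
--     unique_char = {}
--
--     right = 0
--     n = len(s)
--     for left in range(n):
--         while right < n and right - left < minLength:
--             unique_char[s[right]] = unique_char.get(s[right], 0) + 1
--             right += 1
--         if right - left == minLength:
--             if len(unique_char) <= maxUnique:
--                 substring = s[left: right]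
--                 max_occurance[substring] = max_occurance.get(substring, 0) + 1
--         unique_char[s[left]] -= 1
--         if unique_char[s[left]] == 0:
--             del unique_char[s[left]]
--     return max(max_occurance.values()) if max_occurance else 0
-- ===== SOURCE B (Python) =====
-- def getMaxOccurrences(s, minLength, maxLength, maxUnique):
--     if not s or maxLength < 0 or maxUnique < 0 or len(s) < minLength:
--         return 0
--     L = max(1, minLength)
--     counts = {}
--     best = 0
--     for i in range(len(s) - L + 1):
--         w = s[i:i + L]
--         if len(set(w)) <= maxUnique:
--             c = counts.get(w, 0) + 1
--             counts[w] = c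
--             if c > best:
--                 best = c
--     return best
-- ===== Notes on version B (the rewrite author's own statement) =====
-- stated objective: simpler
-- what changed: Replaces A's two-pointer sliding window with its incrementally maintained unique-character multiset (insert/decrement/delete dict bookkeeping) and final max() pass by a direct scan over the n-L+1 windows that computes each window's distinct-character count with set(), counts windows in one dict and tracks the running maximum online.
import Mathlib
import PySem

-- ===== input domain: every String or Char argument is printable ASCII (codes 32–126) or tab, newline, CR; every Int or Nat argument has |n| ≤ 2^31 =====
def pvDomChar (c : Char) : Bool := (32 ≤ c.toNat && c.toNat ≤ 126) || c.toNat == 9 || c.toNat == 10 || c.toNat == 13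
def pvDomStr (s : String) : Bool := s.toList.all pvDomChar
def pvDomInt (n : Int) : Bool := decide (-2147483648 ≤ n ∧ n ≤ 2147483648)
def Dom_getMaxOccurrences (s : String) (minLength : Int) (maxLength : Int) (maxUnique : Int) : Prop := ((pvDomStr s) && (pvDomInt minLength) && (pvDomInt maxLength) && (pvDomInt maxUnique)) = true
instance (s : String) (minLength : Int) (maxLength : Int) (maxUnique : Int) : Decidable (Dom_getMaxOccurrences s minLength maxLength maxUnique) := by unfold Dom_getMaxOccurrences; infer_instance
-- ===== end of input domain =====

-- B replaces A's two-pointer sliding window (incrementally maintained unique-char multiset dict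
-- and a final max() pass) by a direct scan over the n-L+1 windows with a per-window set() and a
-- running maximum; same cost, simpler decomposition.

-- ===== PORT A =====
-- the 'while right < n and right - left < minLength' loop; whenever the body runs, right < n,
-- so the pyGetD default ' ' is never used (s[right] cannot raise)
def fillA (cs : List Char) (n minL left : Int) (unique : PySem.Dict Char Int) (right : Int) :
    PySem.Dict Char Int × Int :=
  if h : right < n ∧ right - left < minL then
    let c := PySem.List.pyGetD cs right ' '
    fillA cs n minL left (unique.insert c (unique.getD c 0 + 1)) (right + 1)
  else (unique, right)
termination_by (n - right).toNat
decreasing_by omega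

-- one iteration of A's 'for left in range(n)' loop; s[left] is in range (left < n) and is a key
-- of unique_char (proved in the lemmas below), so pyGetD/getD match Python's s[left] / dict[...]
def stepA (cs : List Char) (n minL maxUnique : Int)
    (st : PySem.Dict String Int × PySem.Dict Char Int × Int) (left : Int) :
    PySem.Dict String Int × PySem.Dict Char Int × Int :=
  match fillA cs n minL left st.2.1 st.2.2 with
  | (unique, right) =>
    let maxOcc :=
      if right - left = minL then
        if (PySem.Dict.size unique : Int) ≤ maxUnique then
          let substring := String.ofList (PySem.List.slice cs (some left) (some right))
          st.1.insert substring (st.1.getD substring 0 + 1)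
        else st.1
      else st.1
    let c := PySem.List.pyGetD cs left ' '
    let u1 := unique.insert c (unique.getD c 0 - 1)
    (maxOcc, if u1.getD c 0 = 0 then u1.erase c else u1, right)

def getMaxOccurrences (s : String) (minLength : Int) (maxLength : Int) (maxUnique : Int) : Int :=
  if s.toList = [] ∨ maxLength < 0 ∨ maxUnique < 0 ∨ (s.toList.length : Int) < minLength then 0
  else
    let minL := max 1 minLength
    let n : Int := s.toList.length
    let fin := (PySem.List.pyRange 0 n 1).foldl (stepA s.toList n minL maxUnique)
      (PySem.Dict.empty, PySem.Dict.empty, 0)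
    match fin.1.values with
    | [] => 0
    | v :: t => t.foldl max v

-- ===== PORT B =====
def getMaxOccurrences_alt (s : String) (minLength : Int) (maxLength : Int) (maxUnique : Int) : Int :=
  if s.toList = [] ∨ maxLength < 0 ∨ maxUnique < 0 ∨ (s.toList.length : Int) < minLength then 0
  else
    let L := max 1 minLength
    let cs := s.toList
    let fin := (PySem.List.pyRange 0 ((cs.length : Int) - L + 1) 1).foldl
      (fun (st : PySem.Dict String Int × Int) i =>
        let w := String.ofList (PySem.List.slice cs (some i) (some (i + L)))
        if PySem.Set.len (PySem.Set.ofList w.toList) ≤ maxUnique then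
          let c := st.1.getD w 0 + 1
          (st.1.insert w c, if c > st.2 then c else st.2)
        else st)
      (PySem.Dict.empty, 0)
    fin.2

-- ===== PRECONDITION & SPEC =====
def Spec_getMaxOccurrences (s : String) (minLength : Int) (maxLength : Int) (maxUnique : Int) (out : Int) : Prop := out = getMaxOccurrences_alt s minLength maxLength maxUnique
instance (s : String) (minLength : Int) (maxLength : Int) (maxUnique : Int) (out : Int) : Decidable (Spec_getMaxOccurrences s minLength maxLength maxUnique out) := by unfold Spec_getMaxOccurrences; infer_instance

-- ===== CLAIM (what is proved, stated in full; the proofs are below) =====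
def Claim_equal_getMaxOccurrences : Prop := ∀ (s : String) (minLength : Int) (maxLength : Int) (maxUnique : Int), Dom_getMaxOccurrences s minLength maxLength maxUnique → Spec_getMaxOccurrences s minLength maxLength maxUnique (getMaxOccurrences s minLength maxLength maxUnique)

-- ===== LEMMAS AND PROOFS =====

-- window of length LN starting at i
def pvWin (cs : List Char) (LN i : Nat) : List Char := (cs.drop i).take LN
-- window cs[a:b]
def pvWinD (cs : List Char) (a b : Nat) : List Char := (cs.drop a).take (b - a)
-- the unique-char filter
def pvQual (cs : List Char) (LN : Nat) (mu : Int) (i : Nat) : Bool :=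
  decide (PySem.Set.len (PySem.Set.ofList (pvWin cs LN i)) ≤ mu)
-- qualifying windows of the index list
def pvWof (cs : List Char) (LN : Nat) (mu : Int) (is_ : List Nat) : List String :=
  is_.filterMap (fun i => if pvQual cs LN mu i then some (String.ofList (pvWin cs LN i)) else none)
-- max(values) with default 0
def pvMaxVal (l : List Int) : Int := l.foldl max 0
-- counting a window
def pvIns (d : PySem.Dict String Int) (w : String) : PySem.Dict String Int :=
  d.insert w (d.getD w 0 + 1)
-- what A's iteration 'left = i' does to max_occurance
def pvF (cs : List Char) (LN : Nat) (mu : Int) (nN : Nat) (d : PySem.Dict String Int) (i : Nat) :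
    PySem.Dict String Int :=
  if i + LN ≤ nN ∧ pvQual cs LN mu i then pvIns d (String.ofList (pvWin cs LN i)) else d
-- B's loop body over a Nat index
def pvBStep (cs : List Char) (LN : Nat) (mu : Int) (st : PySem.Dict String Int × Int) (i : Nat) :
    PySem.Dict String Int × Int :=
  if pvQual cs LN mu i then
    ((pvIns st.1 (String.ofList (pvWin cs LN i))),
      if st.1.getD (String.ofList (pvWin cs LN i)) 0 + 1 > st.2 then
        st.1.getD (String.ofList (pvWin cs LN i)) 0 + 1 else st.2)
  else st
-- invariant: unique_char represents the multiset of chars of the current window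
def pvR (u : PySem.Dict Char Int) (w : List Char) : Prop :=
  u.keys.Nodup ∧ (∀ c, u.getD c 0 = w.count c) ∧ (∀ c, u.contains c = true ↔ c ∈ w)

theorem pv_foldl_max_pull (l : List Int) : ∀ a b : Int,
    List.foldl max (max a b) l = max b (List.foldl max a l) := by
  induction l with
  | nil => intro a b; simp [max_comm]
  | cons x t ih =>
    intro a b
    simp only [List.foldl_cons]
    rw [max_right_comm, ih]

theorem pv_maxVal_append (l : List Int) (c : Int) : pvMaxVal (l ++ [c]) = max (pvMaxVal l) c := by
  simp [pvMaxVal, List.foldl_append]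

theorem pv_foldl_max_map_update {α : Type} [DecidableEq α] (l : List α) (x : α) (f : α → Int)
    (c : Int) (hnd : l.Nodup) (hx : x ∈ l) (hc : f x ≤ c) : ∀ a : Int,
    List.foldl max a (l.map (fun k => if k = x then c else f k)) =
      max (List.foldl max a (l.map f)) c := by
  induction l with
  | nil => exact absurd hx (by simp)
  | cons y t ih =>
    intro a
    rcases List.nodup_cons.mp hnd with ⟨hy, hndt⟩
    by_cases hyx : y = x
    · subst hyx
      have htx : ∀ k ∈ t, (if k = y then c else f k) = f k := by
        intro k hk
        have : k ≠ y := fun h => hy (h ▸ hk)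
        simp [this]
      simp only [List.map_cons, List.foldl_cons, List.map_congr_left htx]
      rw [pv_foldl_max_pull, pv_foldl_max_pull]
      conv_rhs => rw [max_right_comm, max_eq_right hc]
      simp
    · have hxt : x ∈ t := by
        rcases List.mem_cons.mp hx with h | h
        · exact absurd h.symm hyx
        · exact h
      simp only [List.map_cons, List.foldl_cons, if_neg hyx]
      exact ih hndt hxt (max a (f y))

theorem pv_counter_values {κ : Type} [BEq κ] [LawfulBEq κ] (xs : List κ) :
    (PySem.Dict.counter xs).values = (PySem.Set.ofList xs).map (fun k => (xs.count k : Int)) := by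
  simp [PySem.Dict.values, PySem.Dict.items_counter, List.map_map, Function.comp]

theorem pv_counter_snoc {κ : Type} [BEq κ] (xs : List κ) (x : κ) :
    PySem.Dict.counter (xs ++ [x]) =
      (PySem.Dict.counter xs).insert x ((PySem.Dict.counter xs).getD x 0 + 1) := by
  rw [← PySem.Dict.foldl_insert_getD_add_one_eq_counter, ← PySem.Dict.foldl_insert_getD_add_one_eq_counter,
    List.foldl_append]
  rfl

theorem pv_maxVal_counter_snoc (ws : List String) (w : String) :
    pvMaxVal (PySem.Dict.counter (ws ++ [w])).values =
      max (pvMaxVal (PySem.Dict.counter ws).values) ((ws.count w : Int) + 1) := by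
  rw [pv_counter_values, pv_counter_values, PySem.Set.ofList_append_singleton]
  by_cases hmem : w ∈ ws
  · rw [PySem.Set.add_of_mem ((PySem.Set.mem_ofList _ _).mpr hmem)]
    have hcongr : ∀ k ∈ PySem.Set.ofList ws, (((ws ++ [w]).count k : Int)) =
        (fun k => if k = w then (ws.count w : Int) + 1 else (ws.count k : Int)) k := by
      intro k _
      by_cases hkw : k = w
      · subst hkw; simp [List.count_append]
      · simp [List.count_append, hkw, Ne.symm hkw]
    rw [List.map_congr_left hcongr]
    unfold pvMaxVal
    rw [pv_foldl_max_map_update (PySem.Set.ofList ws) w (fun k => (ws.count k : Int))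
      ((ws.count w : Int) + 1) (PySem.Set.nodup_ofList ws)
      ((PySem.Set.mem_ofList _ _).mpr hmem)
      (by show (ws.count w : Int) ≤ (ws.count w : Int) + 1; omega)]
  · rw [PySem.Set.add_of_not_mem (by simpa [PySem.Set.mem_ofList] using hmem)]
    have hcongr : ∀ k ∈ PySem.Set.ofList ws, (((ws ++ [w]).count k : Int)) = ((ws.count k : Int)) := by
      intro k hk
      have : k ≠ w := fun h => hmem (h ▸ (PySem.Set.mem_ofList _ _).mp hk)
      simp [List.count_append, Ne.symm this]
    rw [List.map_append, List.map_congr_left hcongr, List.map_singleton, pv_maxVal_append]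
    have : ws.count w = 0 := List.count_eq_zero.mpr hmem
    simp [this]

-- erase lemmas (PySem.Dict.erase filters the items list)
theorem pv_get?_erase_self {κ ν : Type} [BEq κ] [LawfulBEq κ] (d : PySem.Dict κ ν) (k : κ) :
    (d.erase k).get? k = none := by
  simp only [PySem.Dict.erase, PySem.Dict.get?, Option.map_eq_none_iff]
  rw [List.find?_eq_none]
  intro p hp
  simp only [List.mem_filter] at hp
  simpa using hp.2

theorem pv_get?_erase_of_ne {κ ν : Type} [BEq κ] [LawfulBEq κ] (d : PySem.Dict κ ν) (k k' : κ)
    (h : k' ≠ k) : (d.erase k).get? k' = d.get? k' := by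
  obtain ⟨items⟩ := d
  simp only [PySem.Dict.erase, PySem.Dict.get?]
  congr 1
  induction items with
  | nil => rfl
  | cons p t ih =>
    by_cases hk : p.1 = k
    · have h1 : (p.1 == k) = true := by simp [hk]
      have h2 : (p.1 == k') = false := by simp [hk, Ne.symm h]
      simp [h1, h2, ih]
    · have h1 : (p.1 == k) = false := by simp [hk]
      by_cases hkk : p.1 = k'
      · simp [hkk, h]
      · have h2 : (p.1 == k') = false := by simp [hkk]
        simp [h1, h2, ih]

theorem pv_nodup_keys_erase {κ ν : Type} [BEq κ] (d : PySem.Dict κ ν) (k : κ)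
    (h : d.keys.Nodup) : (d.erase k).keys.Nodup := by
  have hsub : (d.erase k).items.Sublist d.items := List.filter_sublist
  exact h.sublist (hsub.map _)

-- pvR is preserved by appending a char to the window (the while-loop body)
theorem pvR_incr (u : PySem.Dict Char Int) (w : List Char) (c : Char) (h : pvR u w) :
    pvR (u.insert c (u.getD c 0 + 1)) (w ++ [c]) := by
  obtain ⟨hnd, hcnt, hmem⟩ := h
  refine ⟨PySem.Dict.nodup_keys_insert _ _ _ hnd, ?_, ?_⟩
  · intro k
    rw [PySem.Dict.getD_insert]
    by_cases hk : k = c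
    · subst hk; simp [List.count_append, hcnt k]
    · simp [hk, hcnt k, List.count_append, Ne.symm hk]
  · intro k
    rw [PySem.Dict.contains_insert]
    by_cases hk : k = c
    · subst hk; simp
    · simp [hk, hmem k]

-- pvR is preserved by A's decrement-and-delete step (dropping the window's first char)
theorem pvR_decr (u : PySem.Dict Char Int) (c : Char) (t : List Char) (h : pvR u (c :: t)) :
    pvR (if (u.insert c (u.getD c 0 - 1)).getD c 0 = 0
         then (u.insert c (u.getD c 0 - 1)).erase c
         else u.insert c (u.getD c 0 - 1)) t := by
  obtain ⟨hnd, hcnt, hmem⟩ := h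
  have hc : u.getD c 0 = (t.count c : Int) + 1 := by
    rw [hcnt c]; simp
  have hgd : (u.insert c (u.getD c 0 - 1)).getD c 0 = (t.count c : Int) := by
    rw [PySem.Dict.getD_insert_self, hc]; ring
  by_cases h0 : (u.insert c (u.getD c 0 - 1)).getD c 0 = 0
  · rw [if_pos h0]
    have htc : t.count c = 0 := by
      rw [hgd] at h0; exact_mod_cast h0
    have hct : c ∉ t := List.count_eq_zero.mp htc
    refine ⟨pv_nodup_keys_erase _ _ (PySem.Dict.nodup_keys_insert _ _ _ hnd), ?_, ?_⟩
    · intro k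
      by_cases hk : k = c
      · subst hk
        rw [PySem.Dict.getD, pv_get?_erase_self]
        simp [htc]
      · rw [PySem.Dict.getD, pv_get?_erase_of_ne _ _ _ hk, PySem.Dict.get?_insert_of_ne _ _ hk,
          ← PySem.Dict.getD, hcnt k]
        simp [Ne.symm hk]
    · intro k
      rw [PySem.Dict.contains_eq_isSome_get?]
      by_cases hk : k = c
      · subst hk
        rw [pv_get?_erase_self]
        simp [hct]
      · rw [pv_get?_erase_of_ne _ _ _ hk, PySem.Dict.get?_insert_of_ne _ _ hk,
          ← PySem.Dict.contains_eq_isSome_get?, hmem k]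
        simp [hk]
  · rw [if_neg h0]
    have hct : c ∈ t := by
      rw [hgd] at h0
      exact List.count_pos_iff.mp (by omega)
    refine ⟨PySem.Dict.nodup_keys_insert _ _ _ hnd, ?_, ?_⟩
    · intro k
      by_cases hk : k = c
      · subst hk; exact hgd
      · rw [PySem.Dict.getD_insert_of_ne _ _ _ hk, hcnt k]
        simp [Ne.symm hk]
    · intro k
      rw [PySem.Dict.contains_insert]
      by_cases hk : k = c
      · subst hk; simp [hct]
      · simp [hk, hmem k]

-- len(unique_char) is the number of distinct chars of the window
theorem pvR_size (u : PySem.Dict Char Int) (w : List Char) (h : pvR u w) :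
    PySem.Dict.size u = (PySem.Set.ofList w).length := by
  obtain ⟨hnd, _, hmem⟩ := h
  have hperm : u.keys.Perm (PySem.Set.ofList w) :=
    (List.perm_ext_iff_of_nodup hnd (PySem.Set.nodup_ofList w)).mpr (fun a => by
      rw [← PySem.Dict.contains_iff_mem_keys, hmem a, PySem.Set.mem_ofList])
  have : PySem.Dict.size u = u.keys.length := by
    simp [PySem.Dict.size, PySem.Dict.keys]
  rw [this, hperm.length_eq]

-- the while loop fills the window up to min n (left+L)
theorem fillA_spec (cs : List Char) (nN LN : Nat) (hn : cs.length = nN) :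
    ∀ (k leftN rightN : Nat) (u : PySem.Dict Char Int),
    leftN ≤ rightN → rightN ≤ min nN (leftN + LN) → k = min nN (leftN + LN) - rightN →
    pvR u (pvWinD cs leftN rightN) →
    ∃ u', fillA cs nN LN leftN u rightN = (u', ((min nN (leftN + LN) : Nat) : Int)) ∧
      pvR u' (pvWinD cs leftN (min nN (leftN + LN))) := by
  intro k
  induction k with
  | zero =>
    intro leftN rightN u h1 h2 h3 h4
    have hr : rightN = min nN (leftN + LN) := by omega
    refine ⟨u, ?_, hr ▸ h4⟩
    rw [fillA, dif_neg (by omega), hr]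
  | succ k ih =>
    intro leftN rightN u h1 h2 h3 h4
    have hlt : rightN < min nN (leftN + LN) := by omega
    have hrn : rightN < cs.length := by omega
    have hcget : PySem.List.pyGetD cs (rightN : Int) ' ' = cs[rightN] := by
      rw [PySem.List.pyGetD_natCast]
      exact List.getD_eq_getElem _ _ hrn
    have hwin : pvWinD cs leftN (rightN + 1) = pvWinD cs leftN rightN ++ [cs[rightN]] := by
      unfold pvWinD
      rw [show rightN + 1 - leftN = (rightN - leftN) + 1 by omega, List.take_add_one]
      have hsome : (cs.drop leftN)[rightN - leftN]? = some cs[rightN] := by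
        rw [List.getElem?_drop, show leftN + (rightN - leftN) = rightN by omega]
        exact List.getElem?_eq_getElem hrn
      rw [hsome]
      rfl
    obtain ⟨u', heq, hR⟩ := ih leftN (rightN + 1)
      (u.insert cs[rightN] (u.getD cs[rightN] 0 + 1)) (by omega) (by omega) (by omega)
      (by rw [hwin]; exact pvR_incr _ _ _ h4)
    refine ⟨u', ?_, by rw [show min nN (leftN + LN) = min nN ((leftN) + LN) from rfl]; exact hR⟩
    rw [fillA, dif_pos (by omega)]
    simp only [hcget]
    rw [show ((rightN : Int) + 1) = (((rightN + 1 : Nat)) : Int) by push_cast; ring]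
    rw [heq]

-- A's main loop builds the qualifying-window counts
theorem loopA_spec (cs : List Char) (nN LN : Nat) (mu : Int) (hn : cs.length = nN) (hL : 1 ≤ LN) :
    ∀ (k leftN : Nat) (d : PySem.Dict String Int) (u : PySem.Dict Char Int) (rightN : Nat),
    k = nN - leftN → leftN ≤ rightN → rightN ≤ min nN (leftN + LN) →
    pvR u (pvWinD cs leftN rightN) →
    ((PySem.List.pyRange leftN nN 1).foldl (stepA cs nN LN mu) (d, u, (rightN : Int))).1 =
      (List.range' leftN (nN - leftN)).foldl (pvF cs LN mu nN) d := by
  intro k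
  induction k with
  | zero =>
    intro leftN d u rightN h0 h1 h2 h3
    have hln : nN ≤ leftN := by omega
    rw [PySem.List.pyRange_one_eq_nil (by exact_mod_cast Nat.cast_le.mpr hln),
      show nN - leftN = 0 by omega]
    rfl
  | succ k ih =>
    intro leftN d u rightN h0 h1 h2 h3
    have hlt : leftN < nN := by omega
    set m := min nN (leftN + LN) with hm
    obtain ⟨u1, hfill, hR1⟩ := fillA_spec cs nN LN hn (m - rightN) leftN rightN u h1 h2 rfl h3
    have hstep : stepA cs nN LN mu (d, u, (rightN : Int)) leftN =
        (pvF cs LN mu nN d leftN,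
          (if (u1.insert cs[leftN] (u1.getD cs[leftN] 0 - 1)).getD cs[leftN] 0 = 0
           then (u1.insert cs[leftN] (u1.getD cs[leftN] 0 - 1)).erase cs[leftN]
           else u1.insert cs[leftN] (u1.getD cs[leftN] 0 - 1)), (m : Int)) := by
      have hcgetL : PySem.List.pyGetD cs (leftN : Int) ' ' = cs[leftN] := by
        rw [PySem.List.pyGetD_natCast]
        exact List.getD_eq_getElem _ _ (by omega)
      simp only [stepA]
      rw [hfill]
      simp only [hcgetL]
      refine congrArg (fun z => (z, _, _)) ?_
      have hsz : ((PySem.Dict.size u1 : Nat) : Int) =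
          (((PySem.Set.ofList (pvWinD cs leftN m)).length : Nat) : Int) := by
        rw [pvR_size _ _ hR1]
      by_cases hle : leftN + LN ≤ nN
      · have hmv : m = leftN + LN := by omega
        have hwineq : pvWinD cs leftN m = pvWin cs LN leftN := by
          unfold pvWinD pvWin
          rw [hmv, Nat.add_sub_cancel_left]
        have hslice : PySem.List.slice cs (some (leftN : Int)) (some (m : Int)) =
            pvWin cs LN leftN := by
          rw [PySem.List.slice_natCast, ← pvWinD, hwineq]
        rw [if_pos (by omega : (m : Int) - (leftN : Int) = (LN : Int))]
        unfold pvF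
        by_cases hq : pvQual cs LN mu leftN = true
        · have hqle : ((PySem.Dict.size u1 : Nat) : Int) ≤ mu := by
            rw [hsz, hwineq]
            have := of_decide_eq_true hq
            simpa [PySem.Set.len] using this
          rw [if_pos hqle, if_pos ⟨hle, hq⟩, hslice]
          rfl
        · have hqgt : ¬ ((PySem.Dict.size u1 : Nat) : Int) ≤ mu := by
            rw [hsz, hwineq]
            intro hcon
            exact hq (decide_eq_true (by simpa [PySem.Set.len] using hcon))
          rw [if_neg hqgt, if_neg (fun hcon => hq hcon.2)]
      · rw [if_neg (by omega : ¬ (m : Int) - (leftN : Int) = (LN : Int))]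
        unfold pvF
        rw [if_neg (fun hcon => hle hcon.1)]
    have hmid : leftN + 1 ≤ m := by omega
    have hwin : pvWinD cs leftN m = cs[leftN] :: pvWinD cs (leftN + 1) m := by
      unfold pvWinD
      rw [List.drop_eq_getElem_cons (by omega), show m - leftN = (m - (leftN + 1)) + 1 by omega,
        List.take_succ_cons]
    have hR2 := pvR_decr u1 cs[leftN] (pvWinD cs (leftN + 1) m) (hwin ▸ hR1)
    rw [PySem.List.pyRange_one_cons (by exact_mod_cast Nat.cast_lt.mpr hlt), List.foldl_cons,
      hstep]
    rw [show ((leftN : Int) + 1) = (((leftN + 1 : Nat)) : Int) by push_cast; ring]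
    rw [ih (leftN + 1) (pvF cs LN mu nN d leftN) _ m (by omega) hmid (by omega) hR2]
    rw [show nN - leftN = (nN - (leftN + 1)) + 1 by omega, List.range'_succ]
    rfl

-- indices past n-L contribute nothing
theorem pv_foldl_id {α β : Type} (F : β → α → β) (l : List α) (d : β)
    (h : ∀ d' x, x ∈ l → F d' x = d') : l.foldl F d = d := by
  induction l generalizing d with
  | nil => rfl
  | cons x t ih => simp only [List.foldl_cons, h d x (by simp)]; exact ih d fun d' y hy => h d' y (by simp [hy])

-- the pvF fold is the insert fold over the qualifying windows
theorem pv_foldF (cs : List Char) (LN : Nat) (mu : Int) (nN : Nat) :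
    ∀ (is_ : List Nat) (d : PySem.Dict String Int), (∀ i ∈ is_, i + LN ≤ nN) →
    is_.foldl (pvF cs LN mu nN) d = (pvWof cs LN mu is_).foldl pvIns d := by
  intro is_
  induction is_ with
  | nil => intro d _; rfl
  | cons i t ih =>
    intro d hmem
    have hi : i + LN ≤ nN := hmem i (by simp)
    by_cases hq : pvQual cs LN mu i = true
    · simp only [List.foldl_cons, pvWof, List.filterMap_cons, if_pos hq, pvF]
      rw [if_pos ⟨hi, hq⟩]
      exact ih _ (fun j hj => hmem j (by simp [hj]))
    · simp only [List.foldl_cons, pvWof, List.filterMap_cons, if_neg hq, pvF]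
      rw [if_neg (by tauto)]
      exact ih _ (fun j hj => hmem j (by simp [hj]))

-- B's loop: counts dict is the counter of the qualifying windows, best is its max value
theorem pv_foldB (cs : List Char) (LN : Nat) (mu : Int) :
    ∀ (is_ : List Nat) (ws : List String),
    is_.foldl (pvBStep cs LN mu)
      (PySem.Dict.counter ws, pvMaxVal (PySem.Dict.counter ws).values) =
      (PySem.Dict.counter (ws ++ pvWof cs LN mu is_),
        pvMaxVal (PySem.Dict.counter (ws ++ pvWof cs LN mu is_)).values) := by
  intro is_
  induction is_ with
  | nil => intro ws; simp [pvWof]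
  | cons i t ih =>
    intro ws
    by_cases hq : pvQual cs LN mu i = true
    · have hw : pvWof cs LN mu (i :: t) = String.ofList (pvWin cs LN i) :: pvWof cs LN mu t := by
        simp [pvWof, hq]
      set w := String.ofList (pvWin cs LN i) with hwdef
      have hstep : pvBStep cs LN mu
          (PySem.Dict.counter ws, pvMaxVal (PySem.Dict.counter ws).values) i =
          (PySem.Dict.counter (ws ++ [w]), pvMaxVal (PySem.Dict.counter (ws ++ [w])).values) := by
        simp only [pvBStep, if_pos hq, ← hwdef, pvIns]
        rw [pv_maxVal_counter_snoc, pv_counter_snoc, PySem.Dict.getD_counter]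
        split_ifs with hgt
        · simp [max_eq_right (le_of_lt hgt)]
        · simp [max_eq_left (not_lt.mp hgt)]
      rw [List.foldl_cons, hstep, ih (ws ++ [w]), hw]
      simp [List.append_assoc]
    · have hw : pvWof cs LN mu (i :: t) = pvWof cs LN mu t := by
        simp [pvWof, hq]
      rw [List.foldl_cons]
      have hstep : pvBStep cs LN mu
          (PySem.Dict.counter ws, pvMaxVal (PySem.Dict.counter ws).values) i =
          (PySem.Dict.counter ws, pvMaxVal (PySem.Dict.counter ws).values) := by
        simp [pvBStep, hq]
      rw [hstep, ih ws, hw]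

-- ===== VERDICT (by name: the statement is the Claim_ definition above) =====
-- pvR holds for the empty dict and the empty window
theorem pvR_empty : pvR PySem.Dict.empty [] := by
  refine ⟨by simp [PySem.Dict.keys, PySem.Dict.empty], fun c => by simp, fun c => by
    simp [PySem.Dict.contains, PySem.Dict.empty]⟩

theorem getMaxOccurrences_spec : Claim_equal_getMaxOccurrences := by
  intro s minL maxL mu _
  unfold Spec_getMaxOccurrences getMaxOccurrences getMaxOccurrences_alt
  by_cases hg : s.toList = [] ∨ maxL < 0 ∨ mu < 0 ∨ (s.toList.length : Int) < minL
  · rw [if_pos hg, if_pos hg]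
  · rw [if_neg hg, if_neg hg]
    simp only [not_or] at hg
    obtain ⟨h1, _, _, h4⟩ := hg
    set cs := s.toList with hcs
    set nN := cs.length with hnN
    have hn1 : 1 ≤ nN := List.length_pos_iff.mpr h1
    set LN := (max 1 minL).toNat with hLN
    have hLcast : ((LN : Nat) : Int) = max 1 minL := Int.toNat_of_nonneg (by omega)
    have hL1 : 1 ≤ LN := by omega
    have hLn : LN ≤ nN := by
      have : max 1 minL ≤ (nN : Int) := max_le (by exact_mod_cast hn1) (by omega)
      omega
    set m := nN - LN + 1 with hmdef
    -- A's side
    have hA := loopA_spec cs nN LN mu rfl hL1 nN 0 PySem.Dict.empty PySem.Dict.empty 0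
      (by omega) (by omega) (by omega) (by simpa [pvWinD] using pvR_empty)
    rw [show ((0 : Nat) : Int) = (0 : Int) from rfl] at hA
    simp only [Nat.sub_zero] at hA
    dsimp only
    rw [← hLcast, hA]
    -- the tail of A's loop (left > n - L) does not touch max_occurance
    have hsplit : List.range' 0 nN = List.range' 0 m ++ List.range' m (LN - 1) := by
      have h := @List.range'_append 0 m (LN - 1) 1
      simp only [one_mul, zero_add] at h
      rw [show nN = m + (LN - 1) by omega]
      exact h.symm
    have htail : ∀ (d : PySem.Dict String Int) (i : Nat), i ∈ List.range' m (LN - 1) →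
        pvF cs LN mu nN d i = d := by
      intro d i hi
      rw [List.mem_range'_1] at hi
      unfold pvF
      exact if_neg (fun hcon => absurd hcon.1 (by omega))
    set W := pvWof cs LN mu (List.range m) with hWdef
    have hafold : (List.range' 0 nN).foldl (pvF cs LN mu nN) PySem.Dict.empty =
        PySem.Dict.counter W := by
      rw [hsplit, List.foldl_append, pv_foldl_id _ _ _ htail, ← List.range_eq_range',
        pv_foldF cs LN mu nN (List.range m) PySem.Dict.empty
          (fun i hi => by rw [List.mem_range] at hi; omega), ← hWdef,
        show pvIns = fun (d : PySem.Dict String Int) x => d.insert x (d.getD x 0 + 1) from rfl,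
        PySem.Dict.foldl_insert_getD_add_one_eq_counter]
    rw [hafold]
    -- B's side
    rw [show ((nN : Int) - (LN : Int) + 1) = (m : Int) by omega]
    rw [PySem.List.pyRange_one]
    rw [show (((m : Int) - 0).toNat) = m by omega]
    rw [List.foldl_map]
    have hbody : ∀ (st : PySem.Dict String Int × Int) (k : Nat),
        (if (PySem.Set.ofList
              (String.ofList (PySem.List.slice cs (some ((0:Int) + (k:Int)))
                (some ((0:Int) + (k:Int) + (LN:Int))))).toList).len ≤ mu then
          (st.1.insert (String.ofList (PySem.List.slice cs (some ((0:Int) + (k:Int)))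
                (some ((0:Int) + (k:Int) + (LN:Int)))))
              (st.1.getD (String.ofList (PySem.List.slice cs (some ((0:Int) + (k:Int)))
                (some ((0:Int) + (k:Int) + (LN:Int))))) 0 + 1),
            if st.1.getD (String.ofList (PySem.List.slice cs (some ((0:Int) + (k:Int)))
                  (some ((0:Int) + (k:Int) + (LN:Int))))) 0 + 1 > st.2 then
              st.1.getD (String.ofList (PySem.List.slice cs (some ((0:Int) + (k:Int)))
                (some ((0:Int) + (k:Int) + (LN:Int))))) 0 + 1
            else st.2)
        else st) = pvBStep cs LN mu st k := by
      intro st k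
      simp only [zero_add]
      rw [PySem.List.slice_natCast_add, String.toList_ofList]
      unfold pvBStep pvQual pvIns pvWin
      by_cases hq : PySem.Set.len (PySem.Set.ofList ((cs.drop k).take LN)) ≤ mu
      · rw [if_pos hq]
        conv_rhs => rw [if_pos (decide_eq_true hq)]
      · rw [if_neg hq]
        conv_rhs => rw [if_neg (by simpa using hq : ¬ decide (PySem.Set.len (PySem.Set.ofList ((cs.drop k).take LN)) ≤ mu) = true)]
    rw [funext fun st => funext fun k => hbody st k]
    rw [show ((PySem.Dict.empty : PySem.Dict String Int), (0 : Int)) =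
        (PySem.Dict.counter ([] : List String),
          pvMaxVal (PySem.Dict.counter ([] : List String)).values) from rfl]
    rw [pv_foldB]
    simp only [List.nil_append, ← hWdef]
    -- both sides are about (counter W).values now
    have hpos : ∀ x ∈ (PySem.Dict.counter W).values, 1 ≤ x := by
      rw [pv_counter_values]
      intro x hx
      obtain ⟨kk, hkmem, hEq⟩ := List.mem_map.mp hx
      have : kk ∈ W := (PySem.Set.mem_ofList _ _).mp hkmem
      have := List.count_pos_iff.mpr this
      omega
    cases hv : (PySem.Dict.counter W).values with
    | nil => simp [pvMaxVal]
    | cons v t =>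
      have hv1 : 1 ≤ v := hpos v (by rw [hv]; simp)
      simp only [pvMaxVal, List.foldl_cons]
      rw [max_eq_right (by omega : (0 : Int) ≤ v)]
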